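-- pv_equiv track=rewrite | github.com/AlifSrSE/ProblemSolves | 2109A-it'sTimeToDuel.py | alif
-- ===== SOURCE A (Python) =====
-- from collections import deque
--
-- def alif(n, a):
--     m = n - 1
--     aImp = [[] for _ in range(m + 1)]
--     units = []
--
--     for i in range(1, n + 1):
--         if a[i - 1] == 0:
--             if i > 1:
--                 units.append((i - 1, True))
--             if i < n:
--                 units.append((i, False))
--         else:
--             if i == 1:
--                 units.append((1, True))
--             elif i == n:
--                 units.append((n - 1, False))
--             else:
--                 aImp[i - 1].append(i)
--
--     asgn = [-1] * (m + 1)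
--     dequ = deque(units)
--     bad = False
--
--     while dequ and not bad:
--         v, val = dequ.popleft()
--         if asgn[v] != -1:
--             if asgn[v] != (1 if val else 0):
--                 bad = True
--             continue
--         asgn[v] = 1 if val else 0
--         if val:
--             for to in aImp[v]:
--                 dequ.append((to, True))
--
--     return bad
-- ===== SOURCE B (Python) =====
-- def alif(n, a):
--     m = n - 1
--     forced0 = [False] * (m + 1)
--     forced1 = [False] * (m + 1)
--
--     for i in range(1, n + 1):
--         if a[i - 1] == 0:
--             if i > 1:
--                 forced1[i - 1] = True
--             if i < n:
--                 forced0[i] = True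
--         elif i == 1:
--             forced1[1] = True
--         elif i == n:
--             forced0[n - 1] = True
--
--     for e in range(2, m + 1):
--         if a[e - 1] != 0 and forced1[e - 1]:
--             forced1[e] = True
--
--     return any(forced0[e] and forced1[e] for e in range(1, m + 1))
-- ===== Notes on version B (the rewrite author's own statement) =====
-- stated objective: alternative
-- what changed: Replaces the deque-based constraint-propagation worklist (units queue, assignment array, BFS with conflict detection) by two boolean edge arrays forced0/forced1 filled in one pass plus a single left-to-right sweep that propagates forced-true edges across interior ones, returning whether some edge is forced both ways.
import Mathlib
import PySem

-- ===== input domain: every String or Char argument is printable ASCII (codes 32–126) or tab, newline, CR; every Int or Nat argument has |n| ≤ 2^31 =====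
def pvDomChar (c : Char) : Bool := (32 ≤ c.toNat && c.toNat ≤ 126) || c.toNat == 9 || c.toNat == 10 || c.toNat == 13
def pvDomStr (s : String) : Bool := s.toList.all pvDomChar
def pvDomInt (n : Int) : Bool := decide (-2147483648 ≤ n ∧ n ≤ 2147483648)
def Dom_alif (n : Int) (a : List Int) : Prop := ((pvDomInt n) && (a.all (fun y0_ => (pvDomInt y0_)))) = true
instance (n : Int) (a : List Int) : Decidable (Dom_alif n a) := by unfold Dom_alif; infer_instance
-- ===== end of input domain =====

set_option maxHeartbeats 1000000

-- B replaces A's deque worklist (unit queue + assignment array + conflict detection) by two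
-- boolean edge arrays filled in one pass plus a single left-to-right propagation sweep.

-- ===== PORT A =====

-- body of A's first for-loop (builds the implication lists aImp and the unit queue units)
def alifStep (n : Int) (a : List Int) (st : List (List Int) × List (Int × Bool)) (i : Int) :
    List (List Int) × List (Int × Bool) :=
  if PySem.List.pyGetD a (i - 1) 0 = 0 then
    let u1 := if 1 < i then st.2 ++ [(i - 1, true)] else st.2
    let u2 := if i < n then u1 ++ [(i, false)] else u1
    (st.1, u2)
  else if i = 1 then (st.1, st.2 ++ [((1 : Int), true)])
  else if i = n then (st.1, st.2 ++ [(n - 1, false)])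
  else (PySem.List.pySetD st.1 (i - 1) (PySem.List.pyGetD st.1 (i - 1) [] ++ [i]), st.2)

-- termination helper for the while-loop: assigning a fresh edge shrinks the number of -1 cells
theorem pv_count_set_lt (xs : List Int) (x : Int) (hx : x ≠ -1) :
    ∀ (k : Nat), xs[k]? = some (-1) → ((xs.set k x).count (-1)) < xs.count (-1) := by
  induction xs with
  | nil => intro k h; simp at h
  | cons y ys ih =>
    intro k h
    cases k with
    | zero =>
      simp at h
      subst h
      simp [hx]
    | succ k =>
      simp at h
      have := ih k h
      simp [List.count_cons]
      omega

theorem pv_count_pySetD_lt (xs : List Int) (v : Int) (x : Int) (hx : x ≠ -1)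
    (h : PySem.List.pyGet? xs v = some (-1)) :
    ((PySem.List.pySetD xs v x).count (-1)) < xs.count (-1) := by
  unfold PySem.List.pyGet? at h
  cases hk : PySem.List.pyIdx? xs.length v with
  | none => rw [hk] at h; simp at h
  | some k =>
    rw [hk] at h
    simp at h
    unfold PySem.List.pySetD PySem.List.pySet?
    rw [hk]
    simpa using pv_count_set_lt xs x hx k h

-- A's while-loop over the deque
def alifLoop (aImp : List (List Int)) (asgn : List Int) (dequ : List (Int × Bool)) : Bool :=
  match dequ with
  | [] => false
  | (v, val) :: rest =>
    match h : PySem.List.pyGet? asgn v with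
    | none => false   -- Python raises IndexError here; such inputs are outside Pre_alif
    | some cur =>
      if hc : cur ≠ -1 then
        if cur ≠ (if val then 1 else 0) then true
        else alifLoop aImp asgn rest
      else
        let asgn2 := PySem.List.pySetD asgn v (if val then 1 else 0)
        if val then
          alifLoop aImp asgn2 (rest ++ (PySem.List.pyGetD aImp v []).map (fun t => (t, true)))
        else
          alifLoop aImp asgn2 rest
termination_by (asgn.count (-1), dequ.length)
decreasing_by
  · apply Prod.Lex.right
    simp
  · apply Prod.Lex.left
    apply pv_count_pySetD_lt _ _ _ (by cases val <;> simp)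
    have hcur : cur = -1 := by omega
    rw [h, hcur]
  · apply Prod.Lex.left
    apply pv_count_pySetD_lt _ _ _ (by cases val <;> simp)
    have hcur : cur = -1 := by omega
    rw [h, hcur]

def alif (n : Int) (a : List Int) : Bool :=
  let m := n - 1
  let init := (PySem.List.pyRange 1 (n + 1) 1).foldl (alifStep n a)
    (List.replicate (m + 1).toNat ([] : List Int), ([] : List (Int × Bool)))
  let asgn := List.replicate (m + 1).toNat (-1 : Int)
  alifLoop init.1 asgn init.2

-- ===== PORT B =====

-- body of B's first for-loop (fills the two forced-edge arrays)
def altStep (n : Int) (a : List Int) (st : List Bool × List Bool) (i : Int) :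
    List Bool × List Bool :=
  if PySem.List.pyGetD a (i - 1) 0 = 0 then
    let f1 := if 1 < i then PySem.List.pySetD st.2 (i - 1) true else st.2
    let f0 := if i < n then PySem.List.pySetD st.1 i true else st.1
    (f0, f1)
  else if i = 1 then (st.1, PySem.List.pySetD st.2 1 true)
  else if i = n then (PySem.List.pySetD st.1 (n - 1) true, st.2)
  else st

-- body of B's propagation sweep
def altSweep (a : List Int) (f1 : List Bool) (e : Int) : List Bool :=
  if PySem.List.pyGetD a (e - 1) 0 ≠ 0 ∧ PySem.List.pyGetD f1 (e - 1) false = true then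
    PySem.List.pySetD f1 e true
  else f1

def alif_alt (n : Int) (a : List Int) : Bool :=
  let m := n - 1
  let fs := (PySem.List.pyRange 1 (n + 1) 1).foldl (altStep n a)
    (List.replicate (m + 1).toNat false, List.replicate (m + 1).toNat false)
  let f1 := (PySem.List.pyRange 2 (m + 1) 1).foldl (altSweep a) fs.2
  (PySem.List.pyRange 1 (m + 1) 1).any
    (fun e => PySem.List.pyGetD fs.1 e false && PySem.List.pyGetD f1 e false)

-- ===== PRECONDITION & SPEC =====

-- Pre_ excludes exactly the inputs on which the Python A raises: n > len(a) (the first loop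
-- reads a[n-1]: IndexError) and n = 1 with a[0] != 0 (asgn[1] is read on an array of size 1:
-- IndexError).  B's Python raises on exactly the same inputs.
def Pre_alif (n : Int) (a : List Int) : Prop :=
  n ≤ (a.length : Int) ∧ (n = 1 → PySem.List.pyGetD a 0 0 = 0)
instance (n : Int) (a : List Int) : Decidable (Pre_alif n a) := by unfold Pre_alif; infer_instance

def pvWitness_alif : Int × List Int := (3, [0, 1, 0])

def Spec_alif (n : Int) (a : List Int) (out : Bool) : Prop := out = alif_alt n a
instance (n : Int) (a : List Int) (out : Bool) : Decidable (Spec_alif n a out) := by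
  unfold Spec_alif; infer_instance

-- ===== CLAIM (what is proved, stated in full; the proofs are below) =====
def Claim_equal_alif : Prop :=
  ∀ (n : Int) (a : List Int), Dom_alif n a → Pre_alif n a → Spec_alif n a (alif n a)

-- ===== LEMMAS AND PROOFS =====

-- ---- shared vocabulary: zero positions, forced edges, implications, reachability ----

-- position i of a holds a zero (Python: a[i-1] == 0, as both ports read it)
def pzB (a : List Int) (i : Int) : Bool := PySem.List.pyGetD a (i - 1) 0 == 0

-- edge e is implied by edge e-1 (interior nonzero position e)
def impB (n : Int) (a : List Int) (e : Int) : Bool :=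
  decide (2 ≤ e ∧ e ≤ n - 1) && !(pzB a e)

-- every edge in (s, e] is implied from its predecessor
def chainP (n : Int) (a : List Int) (s e : Int) : Prop :=
  ∀ k : Int, s < k → k ≤ e → impB n a k = true

-- edge e is directly forced true
def T0 (n : Int) (a : List Int) (e : Int) : Prop :=
  (1 ≤ e ∧ e ≤ n - 1 ∧ pzB a (e + 1) = true) ∨ (e = 1 ∧ 1 ≤ n ∧ pzB a 1 = false)

-- edge e is directly forced false
def F0 (n : Int) (a : List Int) (e : Int) : Prop :=
  (1 ≤ e ∧ e ≤ n - 1 ∧ pzB a e = true) ∨ (e = n - 1 ∧ 2 ≤ n ∧ pzB a n = false)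

-- edge e is forced true after propagation
def TStar (n : Int) (a : List Int) (e : Int) : Prop :=
  ∃ s : Int, s ≤ e ∧ T0 n a s ∧ chainP n a s e

-- some edge is forced both ways: the common specification of both programs
def Res (n : Int) (a : List Int) : Prop := ∃ e : Int, F0 n a e ∧ TStar n a e

-- ---- small index helpers ----

theorem pv_pyGetD_nn {α : Type} (xs : List α) (i : Int) (d : α) (h : 0 ≤ i) :
    PySem.List.pyGetD xs i d = xs.getD i.toNat d := by
  have hi : i = ((i.toNat : Nat) : Int) := by omega
  rw [hi, PySem.List.pyGetD_natCast, Int.toNat_natCast]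

theorem pv_pySetD_nn {α : Type} (xs : List α) (i : Int) (x : α) (h : 0 ≤ i) :
    PySem.List.pySetD xs i x = xs.set i.toNat x := by
  have hi : i = ((i.toNat : Nat) : Int) := by omega
  rw [hi, PySem.List.pySetD_natCast, Int.toNat_natCast]

theorem pv_getD_set {α : Type} (xs : List α) (k j : Nat) (x : α) (d : α) :
    (xs.set k x).getD j d = if j = k ∧ k < xs.length then x else xs.getD j d := by
  induction xs generalizing k j with
  | nil => simp [List.getD]
  | cons y ys ih =>
    cases k with
    | zero =>
      cases j with
      | zero => simp
      | succ j => simp [List.getD]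
    | succ k =>
      cases j with
      | zero => simp [List.getD]
      | succ j =>
        simp only [List.set_cons_succ, List.getD_cons_succ, List.length_cons]
        rw [ih]
        split_ifs <;> first | rfl | (exfalso; omega)

theorem pv_getD_replicate_lt {α : Type} (L i : Nat) (x d : α) (h : i < L) :
    (List.replicate L x).getD i d = x := by
  simp [List.getD_eq_getElem?_getD, h]

theorem pv_pyGetD_pySetD {α : Type} (xs : List α) (v w : Int) (x d : α) (hv : 0 ≤ v)
    (hw : 0 ≤ w) (hvl : v < (xs.length : Int)) :
    PySem.List.pyGetD (PySem.List.pySetD xs v x) w d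
      = if w = v then x else PySem.List.pyGetD xs w d := by
  rw [pv_pySetD_nn _ _ _ hv, pv_pyGetD_nn _ _ _ hw, pv_pyGetD_nn _ _ _ hw, pv_getD_set]
  split_ifs <;> first | rfl | (exfalso; omega)

-- total lookup into the assignment array (default -2 is never produced by the loop)
def gA (asgn : List Int) (w : Int) : Int := PySem.List.pyGetD asgn w (-2)

theorem pv_gA_set (asgn : List Int) (v w : Int) (x : Int) (hv : 0 ≤ v)
    (hvl : v < (asgn.length : Int)) (hw : 0 ≤ w) :
    gA (PySem.List.pySetD asgn v x) w = if w = v then x else gA asgn w := by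
  unfold gA
  exact pv_pyGetD_pySetD asgn v w x (-2) hv hw hvl

-- iteration prefixes of the two first-phase folds and of the sweep
def pvA (n : Int) (a : List Int) (j : Nat) : List (List Int) × List (Int × Bool) :=
  (PySem.List.pyRange 1 ((j : Int) + 1) 1).foldl (alifStep n a)
    (List.replicate (n - 1 + 1).toNat ([] : List Int), ([] : List (Int × Bool)))

def pvB (n : Int) (a : List Int) (j : Nat) : List Bool × List Bool :=
  (PySem.List.pyRange 1 ((j : Int) + 1) 1).foldl (altStep n a)
    (List.replicate (n - 1 + 1).toNat false, List.replicate (n - 1 + 1).toNat false)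

def pvS (a : List Int) (f10 : List Bool) (k : Nat) : List Bool :=
  (PySem.List.pyRange 2 ((k : Int) + 1) 1).foldl (altSweep a) f10

theorem pvA_zero (n : Int) (a : List Int) :
    pvA n a 0 = (List.replicate (n - 1 + 1).toNat ([] : List Int), []) := by
  unfold pvA
  rw [show (((0 : Nat) : Int) + 1) = 1 by norm_num, PySem.List.pyRange_one_eq_nil (by norm_num)]
  rfl

theorem pvA_succ (n : Int) (a : List Int) (j : Nat) :
    pvA n a (j + 1) = alifStep n a (pvA n a j) ((j : Int) + 1) := by
  unfold pvA
  rw [show (((j + 1 : Nat) : Int) + 1) = ((j : Int) + 1) + 1 by push_cast; ring]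
  rw [PySem.List.pyRange_one_succ_right (by omega), List.foldl_append]
  rfl

theorem pvB_zero (n : Int) (a : List Int) :
    pvB n a 0 = (List.replicate (n - 1 + 1).toNat false, List.replicate (n - 1 + 1).toNat false) := by
  unfold pvB
  rw [show (((0 : Nat) : Int) + 1) = 1 by norm_num, PySem.List.pyRange_one_eq_nil (by norm_num)]
  rfl

theorem pvB_succ (n : Int) (a : List Int) (j : Nat) :
    pvB n a (j + 1) = altStep n a (pvB n a j) ((j : Int) + 1) := by
  unfold pvB
  rw [show (((j + 1 : Nat) : Int) + 1) = ((j : Int) + 1) + 1 by push_cast; ring]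
  rw [PySem.List.pyRange_one_succ_right (by omega), List.foldl_append]
  rfl

theorem pvS_zero (a : List Int) (f10 : List Bool) : pvS a f10 0 = f10 := by
  unfold pvS
  rw [show (((0 : Nat) : Int) + 1) = 1 by norm_num, PySem.List.pyRange_one_eq_nil (by norm_num)]
  rfl

theorem pvS_one (a : List Int) (f10 : List Bool) : pvS a f10 1 = f10 := by
  unfold pvS
  rw [show (((1 : Nat) : Int) + 1) = 2 by norm_num, PySem.List.pyRange_one_eq_nil (by norm_num)]
  rfl

theorem pvS_succ (a : List Int) (f10 : List Bool) (k : Nat) (hk : 1 ≤ k) :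
    pvS a f10 (k + 1) = altSweep a (pvS a f10 k) ((k : Int) + 1) := by
  unfold pvS
  rw [show (((k + 1 : Nat) : Int) + 1) = ((k : Int) + 1) + 1 by push_cast; ring]
  rw [PySem.List.pyRange_one_succ_right (by omega), List.foldl_append]
  rfl

-- membership in a unit list extended by one pair
theorem pv_mem_app_pair (L : List (Int × Bool)) (w x : Int) (b c : Bool) :
    ((w, b) ∈ L ++ [(x, c)]) ↔ ((w, b) ∈ L ∨ (w = x ∧ b = c)) := by
  simp [List.mem_append, Prod.ext_iff]

-- ---- characterisation of A's first loop ----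

theorem pv_initA (n : Int) (a : List Int) :
    ∀ j : Nat, (j : Int) ≤ n →
    ((pvA n a j).1.length = (n - 1 + 1).toNat) ∧
    (∀ v : Int, 1 ≤ v →
      PySem.List.pyGetD (pvA n a j).1 v []
        = if v + 1 ≤ (j : Int) ∧ v + 1 ≠ n ∧ pzB a (v + 1) = false then [v + 1] else []) ∧
    (∀ w : Int, ((w, false) ∈ (pvA n a j).2
      ↔ ((1 ≤ w ∧ w ≤ (j : Int) ∧ w ≤ n - 1 ∧ pzB a w = true) ∨
         (w = n - 1 ∧ 2 ≤ n ∧ n ≤ (j : Int) ∧ pzB a n = false)))) ∧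
    (∀ w : Int, ((w, true) ∈ (pvA n a j).2
      ↔ ((1 ≤ w ∧ w + 1 ≤ (j : Int) ∧ pzB a (w + 1) = true) ∨
         (w = 1 ∧ 1 ≤ (j : Int) ∧ pzB a 1 = false)))) := by
  intro j
  induction j with
  | zero =>
    intro _
    rw [pvA_zero]
    refine ⟨by simp, ?_, ?_, ?_⟩
    · intro v hv
      rw [if_neg (by rintro ⟨h1, -, -⟩; omega)]
      rw [pv_pyGetD_nn _ _ _ (by omega)]
      by_cases hlt : v.toNat < (n - 1 + 1).toNat
      · exact pv_getD_replicate_lt _ _ _ _ hlt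
      · rw [List.getD_eq_getElem?_getD, List.getElem?_replicate, if_neg hlt]
        rfl
    · intro w
      simp only [List.not_mem_nil, false_iff]
      rintro (⟨h1, h2, h3, h4⟩ | ⟨h1, h2, h3, h4⟩) <;> omega
    · intro w
      simp only [List.not_mem_nil, false_iff]
      rintro (⟨h1, h2, h3⟩ | ⟨h1, h2, h3⟩) <;> omega
  | succ j ih =>
    intro hj
    obtain ⟨IH1, IH2, IH3, IH4⟩ := ih (by omega)
    rw [pvA_succ]
    rw [show ((j + 1 : Nat) : Int) = (j : Int) + 1 by push_cast; ring]
    set i : Int := (j : Int) + 1 with hidef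
    have hi1 : 1 ≤ i := by omega
    have hin : i ≤ n := by omega
    unfold alifStep
    by_cases hz : PySem.List.pyGetD a (i - 1) 0 = 0
    · rw [if_pos hz]
      have hpzi : pzB a i = true := by simp [pzB, hz]
      simp only []
      refine ⟨IH1, ?_, ?_, ?_⟩
      · intro v hv
        rw [IH2 v hv]
        by_cases hvi : v + 1 = i
        · rw [if_neg (by rintro ⟨h1, -, -⟩; omega),
              if_neg (by rintro ⟨-, -, h3⟩; rw [hvi, hpzi] at h3; simp at h3)]
        · by_cases hc1 : v + 1 ≤ (j : Int) ∧ v + 1 ≠ n ∧ pzB a (v + 1) = false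
          · rw [if_pos hc1, if_pos ⟨by omega, hc1.2.1, hc1.2.2⟩]
          · rw [if_neg hc1, if_neg (by rintro ⟨d1, d2, d3⟩; exact hc1 ⟨by omega, d2, d3⟩)]
      · intro w
        have hmem2 : ((w, false) ∈ (if i < n then
              (if 1 < i then (pvA n a j).2 ++ [(i - 1, true)] else (pvA n a j).2) ++ [(i, false)]
            else (if 1 < i then (pvA n a j).2 ++ [(i - 1, true)] else (pvA n a j).2))
            ↔ ((w, false) ∈ (pvA n a j).2 ∨ (i < n ∧ w = i))) := by
          split_ifs with h1 h2 h3 <;> simp [pv_mem_app_pair] <;> tauto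
        rw [hmem2, IH3 w]
        constructor
        · rintro (h | ⟨hiltn, hwi⟩)
          · rcases h with ⟨h1, h2, h3, h4⟩ | ⟨h1, h2, h3, h4⟩
            · exact Or.inl ⟨h1, by omega, h3, h4⟩
            · exact Or.inr ⟨h1, h2, by omega, h4⟩
          · subst hwi
            exact Or.inl ⟨by omega, by omega, by omega, hpzi⟩
        · rintro (⟨h1, h2, h3, h4⟩ | ⟨h1, h2, h3, h4⟩)
          · by_cases hwi : w = i
            · exact Or.inr ⟨by omega, hwi⟩
            · exact Or.inl (Or.inl ⟨h1, by omega, h3, h4⟩)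
          · have hni : n ≠ i := by
              intro hh
              have h5 : pzB a i = false := hh ▸ h4
              rw [h5] at hpzi
              simp at hpzi
            exact Or.inl (Or.inr ⟨h1, h2, by omega, h4⟩)
      · intro w
        have hmem2 : ((w, true) ∈ (if i < n then
              (if 1 < i then (pvA n a j).2 ++ [(i - 1, true)] else (pvA n a j).2) ++ [(i, false)]
            else (if 1 < i then (pvA n a j).2 ++ [(i - 1, true)] else (pvA n a j).2))
            ↔ ((w, true) ∈ (pvA n a j).2 ∨ (1 < i ∧ w = i - 1))) := by
          split_ifs with h1 h2 h3 <;> simp [pv_mem_app_pair] <;> tauto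
        rw [hmem2, IH4 w]
        constructor
        · rintro (h | ⟨h1i, hwi⟩)
          · rcases h with ⟨h1, h2, h3⟩ | ⟨h1, h2, h3⟩
            · exact Or.inl ⟨h1, by omega, h3⟩
            · exact Or.inr ⟨h1, by omega, h3⟩
          · subst hwi
            exact Or.inl ⟨by omega, by omega, by rw [show i - 1 + 1 = i by ring]; exact hpzi⟩
        · rintro (⟨h1, h2, h3⟩ | ⟨h1, h2, h3⟩)
          · by_cases hwi : w + 1 = i
            · exact Or.inr ⟨by omega, by omega⟩
            · exact Or.inl (Or.inl ⟨h1, by omega, h3⟩)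
          · by_cases hjj : 1 ≤ (j : Int)
            · exact Or.inl (Or.inr ⟨h1, hjj, h3⟩)
            · exfalso
              have h5 : pzB a 1 = true := by rw [show (1 : Int) = i by omega]; exact hpzi
              rw [h5] at h3
              simp at h3
    · rw [if_neg hz]
      have hpzi : pzB a i = false := by
        simp only [pzB, beq_eq_false_iff_ne, ne_eq]
        exact hz
      by_cases hieq1 : i = 1
      · rw [if_pos hieq1]
        simp only []
        refine ⟨IH1, ?_, ?_, ?_⟩
        · intro v hv
          rw [IH2 v hv, if_neg (by rintro ⟨h1, -, -⟩; omega),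
              if_neg (by rintro ⟨h1, -, -⟩; omega)]
        · intro w
          rw [pv_mem_app_pair, IH3 w]
          constructor
          · rintro ((⟨h1, h2, h3, h4⟩ | ⟨h1, h2, h3, h4⟩) | ⟨h1, h2⟩)
            · exact Or.inl ⟨h1, by omega, h3, h4⟩
            · exact Or.inr ⟨h1, h2, by omega, h4⟩
            · simp at h2
          · rintro (⟨h1, h2, h3, h4⟩ | ⟨h1, h2, h3, h4⟩)
            · exfalso
              have hw1 : w = 1 := by omega
              rw [hw1, show (1 : Int) = i by omega, hpzi] at h4
              simp at h4
            · exfalso; omega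
        · intro w
          rw [pv_mem_app_pair, IH4 w]
          constructor
          · rintro ((⟨h1, h2, h3⟩ | ⟨h1, h2, h3⟩) | ⟨h1, h2⟩)
            · exfalso; omega
            · exfalso; omega
            · refine Or.inr ⟨h1, by omega, ?_⟩
              rw [show (1 : Int) = i by omega]
              exact hpzi
          · rintro (⟨h1, h2, h3⟩ | ⟨h1, h2, h3⟩)
            · exfalso; omega
            · exact Or.inr ⟨h1, rfl⟩
      · rw [if_neg hieq1]
        by_cases hieqn : i = n
        · rw [if_pos hieqn]
          have hn2 : 2 ≤ n := by omega
          simp only []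
          refine ⟨IH1, ?_, ?_, ?_⟩
          · intro v hv
            rw [IH2 v hv]
            by_cases hc1 : v + 1 ≤ (j : Int) ∧ v + 1 ≠ n ∧ pzB a (v + 1) = false
            · rw [if_pos hc1, if_pos ⟨by omega, hc1.2.1, hc1.2.2⟩]
            · rw [if_neg hc1, if_neg (by rintro ⟨d1, d2, d3⟩; exact hc1 ⟨by omega, d2, d3⟩)]
          · intro w
            rw [pv_mem_app_pair, IH3 w]
            constructor
            · rintro ((⟨h1, h2, h3, h4⟩ | ⟨h1, h2, h3, h4⟩) | ⟨h1, h2⟩)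
              · exact Or.inl ⟨h1, by omega, h3, h4⟩
              · exact Or.inr ⟨h1, h2, by omega, h4⟩
              · refine Or.inr ⟨h1, hn2, by omega, ?_⟩
                rw [show n = i by omega]
                exact hpzi
            · rintro (⟨h1, h2, h3, h4⟩ | ⟨h1, h2, h3, h4⟩)
              · by_cases hwi : w = i
                · exfalso
                  rw [hwi, hpzi] at h4
                  simp at h4
                · exact Or.inl (Or.inl ⟨h1, by omega, h3, h4⟩)
              · exact Or.inr ⟨h1, rfl⟩
          · intro w
            rw [pv_mem_app_pair, IH4 w]
            constructor
            · rintro ((⟨h1, h2, h3⟩ | ⟨h1, h2, h3⟩) | ⟨h1, h2⟩)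
              · exact Or.inl ⟨h1, by omega, h3⟩
              · exact Or.inr ⟨h1, by omega, h3⟩
              · simp at h2
            · rintro (⟨h1, h2, h3⟩ | ⟨h1, h2, h3⟩)
              · by_cases hwi : w + 1 = i
                · exfalso
                  rw [hwi, hpzi] at h3
                  simp at h3
                · exact Or.inl (Or.inl ⟨h1, by omega, h3⟩)
              · exact Or.inl (Or.inr ⟨h1, by omega, h3⟩)
        · rw [if_neg hieqn]
          have hi2 : 2 ≤ i := by omega
          have hiltn : i < n := by omega
          simp only []
          have hS1len : ((pvA n a j).1.length : Int) = n := by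
            rw [IH1]; omega
          refine ⟨?_, ?_, ?_, ?_⟩
          · rw [pv_pySetD_nn _ _ _ (by omega), List.length_set, IH1]
          · intro v hv
            rw [pv_pyGetD_pySetD _ (i - 1) v _ [] (by omega) (by omega) (by omega)]
            by_cases hvi : v = i - 1
            · rw [if_pos hvi, IH2 (i - 1) (by omega), if_neg (by rintro ⟨h1, -, -⟩; omega),
                  if_pos ⟨by omega, by omega, by rw [show v + 1 = i by omega]; exact hpzi⟩]
              simp only [List.nil_append]
              rw [show v + 1 = i by omega]
            · rw [if_neg hvi, IH2 v hv]
              by_cases hc1 : v + 1 ≤ (j : Int) ∧ v + 1 ≠ n ∧ pzB a (v + 1) = false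
              · rw [if_pos hc1, if_pos ⟨by omega, hc1.2.1, hc1.2.2⟩]
              · rw [if_neg hc1, if_neg (by rintro ⟨d1, d2, d3⟩; exact hc1 ⟨by omega, d2, d3⟩)]
          · intro w
            rw [IH3 w]
            constructor
            · rintro (⟨h1, h2, h3, h4⟩ | ⟨h1, h2, h3, h4⟩)
              · exact Or.inl ⟨h1, by omega, h3, h4⟩
              · exact Or.inr ⟨h1, h2, by omega, h4⟩
            · rintro (⟨h1, h2, h3, h4⟩ | ⟨h1, h2, h3, h4⟩)
              · by_cases hwi : w = i
                · exfalso
                  rw [hwi, hpzi] at h4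
                  simp at h4
                · exact Or.inl ⟨h1, by omega, h3, h4⟩
              · exact Or.inr ⟨h1, h2, by omega, h4⟩
          · intro w
            rw [IH4 w]
            constructor
            · rintro (⟨h1, h2, h3⟩ | ⟨h1, h2, h3⟩)
              · exact Or.inl ⟨h1, by omega, h3⟩
              · exact Or.inr ⟨h1, by omega, h3⟩
            · rintro (⟨h1, h2, h3⟩ | ⟨h1, h2, h3⟩)
              · by_cases hwi : w + 1 = i
                · exfalso
                  rw [hwi, hpzi] at h3
                  simp at h3
                · exact Or.inl ⟨h1, by omega, h3⟩
              · exact Or.inr ⟨h1, by omega, h3⟩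

-- ---- characterisation of B's first loop ----

theorem pv_initB (n : Int) (a : List Int) (hn1 : n = 1 → pzB a 1 = true) :
    ∀ j : Nat, (j : Int) ≤ n →
    ((pvB n a j).1.length = (n - 1 + 1).toNat) ∧
    ((pvB n a j).2.length = (n - 1 + 1).toNat) ∧
    (∀ w : Int, 1 ≤ w →
      (PySem.List.pyGetD (pvB n a j).1 w false = true
        ↔ ((1 ≤ w ∧ w ≤ (j : Int) ∧ w ≤ n - 1 ∧ pzB a w = true) ∨
           (w = n - 1 ∧ 2 ≤ n ∧ n ≤ (j : Int) ∧ pzB a n = false)))) ∧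
    (∀ w : Int, 1 ≤ w →
      (PySem.List.pyGetD (pvB n a j).2 w false = true
        ↔ ((1 ≤ w ∧ w + 1 ≤ (j : Int) ∧ pzB a (w + 1) = true) ∨
           (w = 1 ∧ 1 ≤ (j : Int) ∧ pzB a 1 = false)))) := by
  intro j
  induction j with
  | zero =>
    intro _
    rw [pvB_zero]
    have hrep : ∀ w : Int, 1 ≤ w →
        PySem.List.pyGetD (List.replicate (n - 1 + 1).toNat false) w false = false := by
      intro w hw
      rw [pv_pyGetD_nn _ _ _ (by omega)]
      by_cases hlt : w.toNat < (n - 1 + 1).toNat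
      · exact pv_getD_replicate_lt _ _ _ _ hlt
      · rw [List.getD_eq_getElem?_getD, List.getElem?_replicate, if_neg hlt]
        rfl
    refine ⟨by simp, by simp, ?_, ?_⟩
    · intro w hw
      rw [hrep w hw]
      simp only [Bool.false_eq_true, false_iff]
      rintro (⟨h1, h2, h3, h4⟩ | ⟨h1, h2, h3, h4⟩) <;> omega
    · intro w hw
      rw [hrep w hw]
      simp only [Bool.false_eq_true, false_iff]
      rintro (⟨h1, h2, h3⟩ | ⟨h1, h2, h3⟩) <;> omega
  | succ j ih =>
    intro hj
    obtain ⟨IH1, IH2, IH3, IH4⟩ := ih (by omega)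
    rw [pvB_succ]
    rw [show ((j + 1 : Nat) : Int) = (j : Int) + 1 by push_cast; ring]
    set i : Int := (j : Int) + 1 with hidef
    have hi1 : 1 ≤ i := by omega
    have hin : i ≤ n := by omega
    have hL0 : ((pvB n a j).1.length : Int) = n := by rw [IH1]; omega
    have hL1 : ((pvB n a j).2.length : Int) = n := by rw [IH2]; omega
    unfold altStep
    by_cases hz : PySem.List.pyGetD a (i - 1) 0 = 0
    · rw [if_pos hz]
      have hpzi : pzB a i = true := by simp [pzB, hz]
      simp only []
      have hf1len : (if 1 < i then PySem.List.pySetD (pvB n a j).2 (i - 1) true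
          else (pvB n a j).2).length = (n - 1 + 1).toNat := by
        split_ifs with h1
        · rw [pv_pySetD_nn _ _ _ (by omega), List.length_set, IH2]
        · exact IH2
      have hf0len : (if i < n then PySem.List.pySetD (pvB n a j).1 i true
          else (pvB n a j).1).length = (n - 1 + 1).toNat := by
        split_ifs with h1
        · rw [pv_pySetD_nn _ _ _ (by omega), List.length_set, IH1]
        · exact IH1
      refine ⟨hf0len, hf1len, ?_, ?_⟩
      · intro w hw
        have hval : (PySem.List.pyGetD (if i < n then PySem.List.pySetD (pvB n a j).1 i true
            else (pvB n a j).1) w false = true)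
            ↔ ((i < n ∧ w = i) ∨ PySem.List.pyGetD (pvB n a j).1 w false = true) := by
          split_ifs with h1
          · rw [pv_pyGetD_pySetD _ i w true false (by omega) (by omega) (by omega)]
            split_ifs with h2
            · simp [h1, h2]
            · constructor
              · intro h
                exact Or.inr h
              · rintro (⟨-, h3⟩ | h3)
                · exact absurd h3 h2
                · exact h3
          · constructor
            · intro h
              exact Or.inr h
            · rintro (⟨h3, -⟩ | h3)
              · exact absurd h3 h1
              · exact h3
        rw [hval, IH3 w hw]
        constructor
        · rintro (⟨hiltn, hwi⟩ | (⟨h1, h2, h3, h4⟩ | ⟨h1, h2, h3, h4⟩))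
          · subst hwi
            exact Or.inl ⟨by omega, by omega, by omega, hpzi⟩
          · exact Or.inl ⟨h1, by omega, h3, h4⟩
          · exact Or.inr ⟨h1, h2, by omega, h4⟩
        · rintro (⟨h1, h2, h3, h4⟩ | ⟨h1, h2, h3, h4⟩)
          · by_cases hwi : w = i
            · exact Or.inl ⟨by omega, hwi⟩
            · exact Or.inr (Or.inl ⟨h1, by omega, h3, h4⟩)
          · have hni : n ≠ i := by
              intro hh
              have h5 : pzB a i = false := hh ▸ h4
              rw [h5] at hpzi
              simp at hpzi
            exact Or.inr (Or.inr ⟨h1, h2, by omega, h4⟩)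
      · intro w hw
        have hval : (PySem.List.pyGetD (if 1 < i then PySem.List.pySetD (pvB n a j).2 (i - 1) true
            else (pvB n a j).2) w false = true)
            ↔ ((1 < i ∧ w = i - 1) ∨ PySem.List.pyGetD (pvB n a j).2 w false = true) := by
          split_ifs with h1
          · rw [pv_pyGetD_pySetD _ (i - 1) w true false (by omega) (by omega) (by omega)]
            split_ifs with h2
            · simp [h1, h2]
            · constructor
              · intro h
                exact Or.inr h
              · rintro (⟨-, h3⟩ | h3)
                · exact absurd h3 h2
                · exact h3
          · constructor
            · intro h
              exact Or.inr h
            · rintro (⟨h3, -⟩ | h3)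
              · exact absurd h3 h1
              · exact h3
        rw [hval, IH4 w hw]
        constructor
        · rintro (⟨h1i, hwi⟩ | (⟨h1, h2, h3⟩ | ⟨h1, h2, h3⟩))
          · subst hwi
            exact Or.inl ⟨by omega, by omega, by rw [show i - 1 + 1 = i by ring]; exact hpzi⟩
          · exact Or.inl ⟨h1, by omega, h3⟩
          · exact Or.inr ⟨h1, by omega, h3⟩
        · rintro (⟨h1, h2, h3⟩ | ⟨h1, h2, h3⟩)
          · by_cases hwi : w + 1 = i
            · exact Or.inl ⟨by omega, by omega⟩
            · exact Or.inr (Or.inl ⟨h1, by omega, h3⟩)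
          · by_cases hjj : 1 ≤ (j : Int)
            · exact Or.inr (Or.inr ⟨h1, hjj, h3⟩)
            · exfalso
              have h5 : pzB a 1 = true := by rw [show (1 : Int) = i by omega]; exact hpzi
              rw [h5] at h3
              simp at h3
    · rw [if_neg hz]
      have hpzi : pzB a i = false := by
        simp only [pzB, beq_eq_false_iff_ne, ne_eq]
        exact hz
      by_cases hieq1 : i = 1
      · rw [if_pos hieq1]
        have hn2 : 2 ≤ n := by
          by_contra hh
          have hne1 : n = 1 := by omega
          have h6 := hn1 hne1
          rw [show (1 : Int) = i by omega, hpzi] at h6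
          simp at h6
        simp only []
        refine ⟨IH1, by rw [pv_pySetD_nn _ _ _ (by omega), List.length_set, IH2], ?_, ?_⟩
        · intro w hw
          rw [IH3 w hw]
          constructor
          · rintro (⟨h1, h2, h3, h4⟩ | ⟨h1, h2, h3, h4⟩)
            · exact Or.inl ⟨h1, by omega, h3, h4⟩
            · exact Or.inr ⟨h1, h2, by omega, h4⟩
          · rintro (⟨h1, h2, h3, h4⟩ | ⟨h1, h2, h3, h4⟩)
            · exfalso
              have hw1 : w = 1 := by omega
              rw [hw1, show (1 : Int) = i by omega, hpzi] at h4
              simp at h4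
            · exfalso; omega
        · intro w hw
          rw [pv_pyGetD_pySetD _ 1 w true false (by omega) (by omega) (by omega)]
          split_ifs with h2
          · simp only [true_iff]
            exact Or.inr ⟨h2, by omega, by rw [show (1 : Int) = i by omega]; exact hpzi⟩
          · rw [IH4 w hw]
            constructor
            · rintro (⟨h1, h3, h4⟩ | ⟨h1, h3, h4⟩)
              · exfalso; omega
              · exact absurd h1 h2
            · rintro (⟨h1, h3, h4⟩ | ⟨h1, h3, h4⟩)
              · exfalso; omega
              · exact absurd h1 h2
      · rw [if_neg hieq1]
        by_cases hieqn : i = n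
        · rw [if_pos hieqn]
          have hn2 : 2 ≤ n := by omega
          simp only []
          refine ⟨by rw [pv_pySetD_nn _ _ _ (by omega), List.length_set, IH1], IH2, ?_, ?_⟩
          · intro w hw
            rw [pv_pyGetD_pySetD _ (n - 1) w true false (by omega) (by omega) (by omega)]
            split_ifs with h2
            · simp only [true_iff]
              refine Or.inr ⟨h2, hn2, by omega, ?_⟩
              rw [show n = i by omega]
              exact hpzi
            · rw [IH3 w hw]
              constructor
              · rintro (⟨h1, h3, h4, h5⟩ | ⟨h1, h3, h4, h5⟩)
                · by_cases hwi : w = i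
                  · exfalso
                    rw [hwi, hpzi] at h5
                    simp at h5
                  · exact Or.inl ⟨h1, by omega, h4, h5⟩
                · exact absurd h1 h2
              · rintro (⟨h1, h3, h4, h5⟩ | ⟨h1, h3, h4, h5⟩)
                · exact Or.inl ⟨h1, by omega, h4, h5⟩
                · exact absurd h1 h2
          · intro w hw
            rw [IH4 w hw]
            constructor
            · rintro (⟨h1, h2, h3⟩ | ⟨h1, h2, h3⟩)
              · exact Or.inl ⟨h1, by omega, h3⟩
              · exact Or.inr ⟨h1, by omega, h3⟩
            · rintro (⟨h1, h2, h3⟩ | ⟨h1, h2, h3⟩)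
              · by_cases hwi : w + 1 = i
                · exfalso
                  rw [hwi, hpzi] at h3
                  simp at h3
                · exact Or.inl ⟨h1, by omega, h3⟩
              · exact Or.inr ⟨h1, by omega, h3⟩
        · rw [if_neg hieqn]
          refine ⟨IH1, IH2, ?_, ?_⟩
          · intro w hw
            rw [IH3 w hw]
            constructor
            · rintro (⟨h1, h2, h3, h4⟩ | ⟨h1, h2, h3, h4⟩)
              · exact Or.inl ⟨h1, by omega, h3, h4⟩
              · exact Or.inr ⟨h1, h2, by omega, h4⟩
            · rintro (⟨h1, h2, h3, h4⟩ | ⟨h1, h2, h3, h4⟩)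
              · by_cases hwi : w = i
                · exfalso
                  rw [hwi, hpzi] at h4
                  simp at h4
                · exact Or.inl ⟨h1, by omega, h3, h4⟩
              · exact Or.inr ⟨h1, h2, by omega, h4⟩
          · intro w hw
            rw [IH4 w hw]
            constructor
            · rintro (⟨h1, h2, h3⟩ | ⟨h1, h2, h3⟩)
              · exact Or.inl ⟨h1, by omega, h3⟩
              · exact Or.inr ⟨h1, by omega, h3⟩
            · rintro (⟨h1, h2, h3⟩ | ⟨h1, h2, h3⟩)
              · by_cases hwi : w + 1 = i
                · exfalso
                  rw [hwi, hpzi] at h3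
                  simp at h3
                · exact Or.inl ⟨h1, by omega, h3⟩
              · exact Or.inr ⟨h1, by omega, h3⟩

-- ---- TStar recurrences ----

theorem pv_TStar_base (n : Int) (a : List Int) (e : Int) (he : e ≤ 1) :
    TStar n a e ↔ T0 n a e := by
  constructor
  · rintro ⟨s, hs, hT, hch⟩
    have hs1 : 1 ≤ s := by
      rcases hT with ⟨h1, -, -⟩ | ⟨h1, -, -⟩ <;> omega
    have hse : s = e := by
      by_contra hne
      have h2 := hch e (by omega) (by omega)
      simp [impB] at h2
      omega
    subst hse
    exact hT
  · intro h
    exact ⟨e, le_refl _, h, fun k h1 h2 => by omega⟩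

theorem pv_TStar_rec (n : Int) (a : List Int) (e : Int) (he : 2 ≤ e) :
    TStar n a e ↔ (T0 n a e ∨ (impB n a e = true ∧ TStar n a (e - 1))) := by
  constructor
  · rintro ⟨s, hs, hT, hch⟩
    by_cases hse : s = e
    · subst hse
      exact Or.inl hT
    · exact Or.inr ⟨hch e (by omega) (by omega),
        s, by omega, hT, fun k h1 h2 => hch k h1 (by omega)⟩
  · rintro (h | ⟨h1, s, hs, hT, hch⟩)
    · exact ⟨e, le_refl _, h, fun k h1 h2 => by omega⟩
    · refine ⟨s, by omega, hT, fun k hk1 hk2 => ?_⟩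
      by_cases hk : k = e
      · subst hk
        exact h1
      · exact hch k hk1 (by omega)

-- ---- the reachable-set and conflict predicates for A's while-loop ----

def Cl (n : Int) (a : List Int) (q : List (Int × Bool)) (w : Int) : Prop :=
  ∃ v : Int, (v, true) ∈ q ∧ v ≤ w ∧ chainP n a v w

def Conf (n : Int) (a : List Int) (asgn : List Int) (q : List (Int × Bool)) : Prop :=
  ∃ w : Int, 1 ≤ w ∧ w ≤ n - 1 ∧
    ((Cl n a q w ∧ (gA asgn w = 0 ∨ (w, false) ∈ q)) ∨ ((w, false) ∈ q ∧ gA asgn w = 1))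

def InvL (n : Int) (a : List Int) (asgn : List Int) (q : List (Int × Bool)) : Prop :=
  asgn.length = n.toNat ∧
  (∀ p ∈ q, 1 ≤ p.1 ∧ p.1 ≤ n - 1) ∧
  (∀ w : Int, 1 ≤ w → w ≤ n - 1 → (gA asgn w = -1 ∨ gA asgn w = 0 ∨ gA asgn w = 1)) ∧
  (∀ u : Int, 1 ≤ u → u ≤ n - 1 → gA asgn u = 1 → impB n a (u + 1) = true →
    (gA asgn (u + 1) = 1 ∨ (u + 1, true) ∈ q))

theorem pv_cl_cons_true (n : Int) (a : List Int) (v : Int) (rest : List (Int × Bool)) (w : Int) :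
    Cl n a ((v, true) :: rest) w ↔ ((v ≤ w ∧ chainP n a v w) ∨ Cl n a rest w) := by
  constructor
  · rintro ⟨u, hu, h1, h2⟩
    rcases List.mem_cons.mp hu with h | h
    · left
      have hu1 : u = v := by
        have h3 := congrArg Prod.fst h
        simpa using h3
      subst hu1
      exact ⟨h1, h2⟩
    · exact Or.inr ⟨u, h, h1, h2⟩
  · rintro (⟨h1, h2⟩ | ⟨u, hu, h1, h2⟩)
    · exact ⟨v, List.mem_cons_self .., h1, h2⟩
    · exact ⟨u, List.mem_cons_of_mem _ hu, h1, h2⟩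

theorem pv_cl_cons_false (n : Int) (a : List Int) (v : Int) (rest : List (Int × Bool)) (w : Int) :
    Cl n a ((v, false) :: rest) w ↔ Cl n a rest w := by
  constructor
  · rintro ⟨u, hu, h1, h2⟩
    rcases List.mem_cons.mp hu with h | h
    · exfalso
      have h3 := congrArg Prod.snd h
      simp at h3
    · exact ⟨u, h, h1, h2⟩
  · rintro ⟨u, hu, h1, h2⟩
    exact ⟨u, List.mem_cons_of_mem _ hu, h1, h2⟩

theorem pv_cl_append (n : Int) (a : List Int) (q l : List (Int × Bool)) (w : Int) :
    Cl n a (q ++ l) w ↔ (Cl n a q w ∨ Cl n a l w) := by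
  constructor
  · rintro ⟨u, hu, h1, h2⟩
    rcases List.mem_append.mp hu with h | h
    · exact Or.inl ⟨u, h, h1, h2⟩
    · exact Or.inr ⟨u, h, h1, h2⟩
  · rintro (⟨u, hu, h1, h2⟩ | ⟨u, hu, h1, h2⟩)
    · exact ⟨u, List.mem_append.mpr (Or.inl hu), h1, h2⟩
    · exact ⟨u, List.mem_append.mpr (Or.inr hu), h1, h2⟩

theorem pv_memf_cons_true (w v : Int) (rest : List (Int × Bool)) :
    ((w, false) ∈ (v, true) :: rest) ↔ (w, false) ∈ rest := by
  simp

theorem pv_memf_append_opt (w x : Int) (rest : List (Int × Bool)) (c : Prop) [Decidable c] :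
    ((w, false) ∈ rest ++ (if c then [(x, true)] else [])) ↔ (w, false) ∈ rest := by
  split_ifs <;> simp

-- climbing a chain of already-assigned-true edges
theorem pv_climb (n : Int) (a : List Int) (asgn : List Int) (v0 : Int)
    (rest : List (Int × Bool))
    (hii : ∀ u : Int, 1 ≤ u → u ≤ n - 1 → gA asgn u = 1 → impB n a (u + 1) = true →
      (gA asgn (u + 1) = 1 ∨ (u + 1, true) ∈ (v0, true) :: rest)) :
    ∀ (d : Nat) (v w : Int), w = v + (d : Int) → v0 ≤ v → 1 ≤ v → w ≤ n - 1 →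
      gA asgn v = 1 → chainP n a v w → (gA asgn w = 1 ∨ Cl n a rest w) := by
  intro d
  induction d with
  | zero =>
    intro v w hw _ _ _ hv _
    left
    rw [show w = v by omega]
    exact hv
  | succ d ih =>
    intro v w hw hv0 hv1 hwn hval hch
    have himp : impB n a (v + 1) = true := hch (v + 1) (by omega) (by omega)
    rcases hii v hv1 (by omega) hval himp with h1 | h1
    · exact ih (v + 1) w (by omega) (by omega) (by omega) hwn h1
        (fun k hk1 hk2 => hch k (by omega) hk2)
    · rcases List.mem_cons.mp h1 with h | h
      · exfalso
        have h2 : v + 1 = v0 := by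
          have h3 := congrArg Prod.fst h
          simpa using h3
        omega
      · exact Or.inr ⟨v + 1, h, by omega, fun k hk1 hk2 => hch k (by omega) hk2⟩

-- ---- Conf transfer lemmas, one per loop case ----

theorem pv_conf_mono (n : Int) (a : List Int) (asgn : List Int) (p : Int × Bool)
    (rest : List (Int × Bool)) (h : Conf n a asgn rest) : Conf n a asgn (p :: rest) := by
  obtain ⟨w, h1, h2, h3⟩ := h
  refine ⟨w, h1, h2, ?_⟩
  rcases h3 with ⟨⟨u, hu, hc1, hc2⟩, h4⟩ | ⟨h4, h5⟩
  · exact Or.inl ⟨⟨u, List.mem_cons_of_mem _ hu, hc1, hc2⟩,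
      h4.imp id (List.mem_cons_of_mem _)⟩
  · exact Or.inr ⟨List.mem_cons_of_mem _ h4, h5⟩

theorem pv_conf_pop_true1 (n : Int) (a : List Int) (asgn : List Int) (v : Int)
    (rest : List (Int × Bool)) (hga : gA asgn v = 1) (hv1 : 1 ≤ v)
    (hii : ∀ u : Int, 1 ≤ u → u ≤ n - 1 → gA asgn u = 1 → impB n a (u + 1) = true →
      (gA asgn (u + 1) = 1 ∨ (u + 1, true) ∈ (v, true) :: rest)) :
    Conf n a asgn ((v, true) :: rest) ↔ Conf n a asgn rest := by
  constructor
  · rintro ⟨w, hw1, hw2, hcase⟩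
    rcases hcase with ⟨hcl, hside⟩ | ⟨hmem, h1⟩
    · have hside' : gA asgn w = 0 ∨ (w, false) ∈ rest := by
        rcases hside with h0 | hmemf
        · exact Or.inl h0
        · exact Or.inr ((pv_memf_cons_true w v rest).mp hmemf)
      rcases (pv_cl_cons_true n a v rest w).mp hcl with ⟨hvw, hch⟩ | hcl'
      · rcases pv_climb n a asgn v rest hii (w - v).toNat v w (by omega) le_rfl hv1
          (by omega) hga hch with h | h
        · rcases hside' with h0 | hmemf
          · exact absurd h0 (by omega)
          · exact ⟨w, hw1, hw2, Or.inr ⟨hmemf, h⟩⟩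
        · exact ⟨w, hw1, hw2, Or.inl ⟨h, hside'⟩⟩
      · exact ⟨w, hw1, hw2, Or.inl ⟨hcl', hside'⟩⟩
    · exact ⟨w, hw1, hw2, Or.inr ⟨(pv_memf_cons_true w v rest).mp hmem, h1⟩⟩
  · exact pv_conf_mono n a asgn _ rest

theorem pv_conf_pop_false0 (n : Int) (a : List Int) (asgn : List Int) (v : Int)
    (rest : List (Int × Bool)) (hga : gA asgn v = 0) :
    Conf n a asgn ((v, false) :: rest) ↔ Conf n a asgn rest := by
  constructor
  · rintro ⟨w, hw1, hw2, hcase⟩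
    rcases hcase with ⟨hcl, hside⟩ | ⟨hmem, h1⟩
    · have hcl' := (pv_cl_cons_false n a v rest w).mp hcl
      rcases hside with h0 | hmemf
      · exact ⟨w, hw1, hw2, Or.inl ⟨hcl', Or.inl h0⟩⟩
      · rcases List.mem_cons.mp hmemf with hh | hh
        · have hwv : w = v := by
            have h3 := congrArg Prod.fst hh
            simpa using h3
          exact ⟨w, hw1, hw2, Or.inl ⟨hcl', Or.inl (hwv ▸ hga)⟩⟩
        · exact ⟨w, hw1, hw2, Or.inl ⟨hcl', Or.inr hh⟩⟩
    · rcases List.mem_cons.mp hmem with hh | hh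
      · exfalso
        have hwv : w = v := by
          have h3 := congrArg Prod.fst hh
          simpa using h3
        rw [hwv, hga] at h1
        omega
      · exact ⟨w, hw1, hw2, Or.inr ⟨hh, h1⟩⟩
  · exact pv_conf_mono n a asgn _ rest

theorem pv_conf_assign_false (n : Int) (a : List Int) (asgn : List Int) (v : Int)
    (rest : List (Int × Bool)) (hga : gA asgn v = -1) (hv1 : 1 ≤ v)
    (hvl : v < (asgn.length : Int)) :
    Conf n a asgn ((v, false) :: rest) ↔ Conf n a (PySem.List.pySetD asgn v 0) rest := by
  have hset : ∀ w : Int, 0 ≤ w →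
      gA (PySem.List.pySetD asgn v 0) w = if w = v then 0 else gA asgn w :=
    fun w hw => pv_gA_set asgn v w 0 (by omega) hvl hw
  constructor
  · rintro ⟨w, hw1, hw2, hcase⟩
    have hw0 : (0 : Int) ≤ w := by omega
    rcases hcase with ⟨hcl, hside⟩ | ⟨hmem, h1⟩
    · have hcl' := (pv_cl_cons_false n a v rest w).mp hcl
      refine ⟨w, hw1, hw2, Or.inl ⟨hcl', ?_⟩⟩
      rcases hside with h0 | hmemf
      · left
        rw [hset w hw0]
        split_ifs with hwv
        · rfl
        · exact h0
      · rcases List.mem_cons.mp hmemf with hh | hh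
        · have hwv : w = v := by
            have h3 := congrArg Prod.fst hh
            simpa using h3
          left
          rw [hset w hw0, if_pos hwv]
        · exact Or.inr hh
    · rcases List.mem_cons.mp hmem with hh | hh
      · exfalso
        have hwv : w = v := by
          have h3 := congrArg Prod.fst hh
          simpa using h3
        rw [hwv, hga] at h1
        omega
      · refine ⟨w, hw1, hw2, Or.inr ⟨hh, ?_⟩⟩
        rw [hset w hw0]
        split_ifs with hwv
        · exfalso
          rw [hwv, hga] at h1
          omega
        · exact h1
  · rintro ⟨w, hw1, hw2, hcase⟩
    have hw0 : (0 : Int) ≤ w := by omega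
    rcases hcase with ⟨hcl, hside⟩ | ⟨hmem, h1⟩
    · refine ⟨w, hw1, hw2, Or.inl ⟨(pv_cl_cons_false n a v rest w).mpr hcl, ?_⟩⟩
      rcases hside with h0 | hmemf
      · rw [hset w hw0] at h0
        by_cases hwv : w = v
        · right
          rw [hwv]
          exact List.mem_cons_self ..
        · rw [if_neg hwv] at h0
          exact Or.inl h0
      · exact Or.inr (List.mem_cons_of_mem _ hmemf)
    · rw [hset w hw0] at h1
      by_cases hwv : w = v
      · rw [if_pos hwv] at h1
        exact absurd h1 (by omega)
      · rw [if_neg hwv] at h1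
        exact ⟨w, hw1, hw2, Or.inr ⟨List.mem_cons_of_mem _ hmem, h1⟩⟩

theorem pv_conf_assign_true (n : Int) (a : List Int) (asgn : List Int) (v : Int)
    (rest : List (Int × Bool)) (hga : gA asgn v = -1) (hv1 : 1 ≤ v) (hv2 : v ≤ n - 1)
    (hvl : v < (asgn.length : Int)) :
    Conf n a asgn ((v, true) :: rest)
      ↔ Conf n a (PySem.List.pySetD asgn v 1)
          (rest ++ (if impB n a (v + 1) = true then [((v + 1 : Int), true)] else [])) := by
  have hset : ∀ w : Int, 0 ≤ w →
      gA (PySem.List.pySetD asgn v 1) w = if w = v then 1 else gA asgn w :=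
    fun w hw => pv_gA_set asgn v w 1 (by omega) hvl hw
  have hclq2 : ∀ w, Cl n a (rest ++ (if impB n a (v + 1) = true then [((v + 1 : Int), true)] else [])) w
      ↔ (Cl n a rest w ∨ (impB n a (v + 1) = true ∧ v + 1 ≤ w ∧ chainP n a (v + 1) w)) := by
    intro w
    rw [pv_cl_append]
    by_cases h : impB n a (v + 1) = true
    · rw [if_pos h]
      have hsing : Cl n a [((v + 1 : Int), true)] w ↔ (v + 1 ≤ w ∧ chainP n a (v + 1) w) := by
        unfold Cl
        constructor
        · rintro ⟨u, hu, h1, h2⟩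
          have hu1 : u = v + 1 := by
            simp [Prod.ext_iff] at hu
            exact hu
          subst hu1
          exact ⟨h1, h2⟩
        · rintro ⟨h1, h2⟩
          exact ⟨v + 1, by simp, h1, h2⟩
      rw [hsing]
      tauto
    · rw [if_neg h]
      have hnil : Cl n a ([] : List (Int × Bool)) w ↔ False := by
        unfold Cl
        simp
      rw [hnil]
      tauto
  constructor
  · rintro ⟨w, hw1, hw2, hcase⟩
    have hw0 : (0 : Int) ≤ w := by omega
    rcases hcase with ⟨hcl, hside⟩ | ⟨hmem, h1⟩
    · have hside' : gA (PySem.List.pySetD asgn v 1) w = 0 ∨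
          (w, false) ∈ rest ++ (if impB n a (v + 1) = true then [((v + 1 : Int), true)] else []) := by
        rcases hside with h0 | hmemf
        · left
          rw [hset w hw0]
          split_ifs with hwv
          · exfalso
            rw [hwv, hga] at h0
            omega
          · exact h0
        · exact Or.inr ((pv_memf_append_opt w (v + 1) rest _).mpr
            ((pv_memf_cons_true w v rest).mp hmemf))
      rcases (pv_cl_cons_true n a v rest w).mp hcl with ⟨hvw, hch⟩ | hcl'
      · by_cases hwv : w = v
        · rcases hside with h0 | hmemf
          · exfalso
            rw [hwv, hga] at h0
            omega
          · have hmr : (w, false) ∈ rest := (pv_memf_cons_true w v rest).mp hmemf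
            exact ⟨w, hw1, hw2, Or.inr ⟨(pv_memf_append_opt w (v + 1) rest _).mpr hmr,
              by rw [hset w hw0, if_pos hwv]⟩⟩
        · have hvw' : v < w := by omega
          have himp : impB n a (v + 1) = true := hch (v + 1) (by omega) (by omega)
          have hcl2 := (hclq2 w).mpr (Or.inr ⟨himp, by omega,
            fun k hk1 hk2 => hch k (by omega) hk2⟩)
          exact ⟨w, hw1, hw2, Or.inl ⟨hcl2, hside'⟩⟩
      · exact ⟨w, hw1, hw2, Or.inl ⟨(hclq2 w).mpr (Or.inl hcl'), hside'⟩⟩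
    · have hmr : (w, false) ∈ rest := (pv_memf_cons_true w v rest).mp hmem
      have hwv : w ≠ v := by
        intro hh
        rw [hh, hga] at h1
        omega
      exact ⟨w, hw1, hw2, Or.inr ⟨(pv_memf_append_opt w (v + 1) rest _).mpr hmr,
        by rw [hset w hw0, if_neg hwv]; exact h1⟩⟩
  · rintro ⟨w, hw1, hw2, hcase⟩
    have hw0 : (0 : Int) ≤ w := by omega
    rcases hcase with ⟨hcl, hside⟩ | ⟨hmem, h1⟩
    · have hclq : Cl n a ((v, true) :: rest) w := by
        rcases (hclq2 w).mp hcl with h | ⟨himp, hw', hch⟩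
        · exact (pv_cl_cons_true n a v rest w).mpr (Or.inr h)
        · refine (pv_cl_cons_true n a v rest w).mpr (Or.inl ⟨by omega, ?_⟩)
          intro k hk1 hk2
          by_cases hk : k = v + 1
          · subst hk
            exact himp
          · exact hch k (by omega) hk2
      refine ⟨w, hw1, hw2, ?_⟩
      rcases hside with h0 | hmemf
      · rw [hset w hw0] at h0
        by_cases hwv : w = v
        · rw [if_pos hwv] at h0
          exact absurd h0 (by omega)
        · rw [if_neg hwv] at h0
          exact Or.inl ⟨hclq, Or.inl h0⟩
      · have hmr : (w, false) ∈ rest := (pv_memf_append_opt w (v + 1) rest _).mp hmemf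
        exact Or.inl ⟨hclq, Or.inr (List.mem_cons_of_mem _ hmr)⟩
    · have hmr : (w, false) ∈ rest := (pv_memf_append_opt w (v + 1) rest _).mp hmem
      rw [hset w hw0] at h1
      by_cases hwv : w = v
      · subst hwv
        exact ⟨w, hw1, hw2, Or.inl ⟨(pv_cl_cons_true n a w rest w).mpr
          (Or.inl ⟨le_refl _, fun k hk1 hk2 => by omega⟩),
          Or.inr (List.mem_cons_of_mem _ hmr)⟩⟩
      · rw [if_neg hwv] at h1
        exact ⟨w, hw1, hw2, Or.inr ⟨List.mem_cons_of_mem _ hmr, h1⟩⟩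

-- ---- the main while-loop lemma ----

theorem pv_conf_nil (n : Int) (a : List Int) (asgn : List Int) :
    ¬ Conf n a asgn [] := by
  rintro ⟨w, -, -, ⟨⟨u, hu, -, -⟩, -⟩ | ⟨hu, -⟩⟩ <;> simp at hu

theorem pv_loop_iff (n : Int) (a : List Int) (imp : List (List Int))
    (Himp : ∀ v : Int, 1 ≤ v →
      PySem.List.pyGetD imp v [] = if impB n a (v + 1) = true then [v + 1] else []) :
    ∀ (asgn : List Int) (q : List (Int × Bool)), InvL n a asgn q →
      (alifLoop imp asgn q = true ↔ Conf n a asgn q) := by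
  suffices H : ∀ (M : Nat) (asgn : List Int) (q : List (Int × Bool)),
      asgn.count (-1) + q.length ≤ M → InvL n a asgn q →
      (alifLoop imp asgn q = true ↔ Conf n a asgn q) by
    intro asgn q h
    exact H (asgn.count (-1) + q.length) asgn q le_rfl h
  intro M
  induction M with
  | zero =>
    intro asgn q hM hInv
    have hq : q = [] := by
      cases q with
      | nil => rfl
      | cons p rest => simp at hM
    subst hq
    rw [alifLoop]
    simp only [Bool.false_eq_true, false_iff]
    exact pv_conf_nil n a asgn
  | succ M ih =>
    intro asgn q hM hInv
    obtain ⟨hlen, hmem, hvals, hprop⟩ := hInv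
    cases q with
    | nil =>
      rw [alifLoop]
      simp only [Bool.false_eq_true, false_iff]
      exact pv_conf_nil n a asgn
    | cons p rest =>
      obtain ⟨v, val⟩ := p
      have hvb := hmem (v, val) (List.mem_cons_self ..)
      have hv1 : 1 ≤ v := hvb.1
      have hv2 : v ≤ n - 1 := hvb.2
      have hn2 : 2 ≤ n := by omega
      have hvlen : v < (asgn.length : Int) := by
        rw [hlen]
        omega
      obtain ⟨cur, hcur⟩ : ∃ c, PySem.List.pyGet? asgn v = some c := by
        cases hc : PySem.List.pyGet? asgn v with
        | none =>
          exfalso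
          rw [PySem.List.pyGet?_eq_none_iff] at hc
          apply hc
          unfold PySem.Raise.InRange
          constructor <;> omega
        | some c => exact ⟨c, rfl⟩
      have hgav : gA asgn v = cur := by
        unfold gA PySem.List.pyGetD
        rw [hcur]
        rfl
      have hMr : asgn.count (-1) + rest.length ≤ M := by
        simp only [List.length_cons] at hM
        omega
      have hstep : alifLoop imp asgn ((v, val) :: rest) =
          (if cur ≠ -1 then
            (if cur ≠ (if val then 1 else 0) then true else alifLoop imp asgn rest)
          else
            (if val then
              alifLoop imp (PySem.List.pySetD asgn v (if val then 1 else 0))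
                (rest ++ (PySem.List.pyGetD imp v []).map (fun t => (t, true)))
            else
              alifLoop imp (PySem.List.pySetD asgn v (if val then 1 else 0)) rest)) := by
        conv_lhs => rw [alifLoop]
        split
        · rename_i heq
          rw [heq] at hcur
          simp at hcur
        · rename_i c heq
          rw [heq] at hcur
          have hc : c = cur := by injection hcur
          subst hc
          rfl
      have hvalsv := hvals v hv1 hv2
      rw [hgav] at hvalsv
      rcases hvalsv with hc1 | hc1 | hc1
      · -- cur = -1 : fresh assignment
        subst hc1
        rw [hstep, if_neg (by omega)]
        have hcnt : (PySem.List.pySetD asgn v (if val then 1 else 0)).count (-1)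
            < asgn.count (-1) := by
          apply pv_count_pySetD_lt _ _ _ (by cases val <;> simp)
          rw [hcur]
        cases val with
        | false =>
          simp only [Bool.false_eq_true, reduceIte] at hcnt ⊢
          have hset : ∀ w : Int, 0 ≤ w →
              gA (PySem.List.pySetD asgn v 0) w = if w = v then 0 else gA asgn w :=
            fun w hw => pv_gA_set asgn v w 0 (by omega) hvlen hw
          have hInv2 : InvL n a (PySem.List.pySetD asgn v 0) rest := by
            refine ⟨?_, ?_, ?_, ?_⟩
            · rw [pv_pySetD_nn _ _ _ (by omega), List.length_set, hlen]
            · exact fun p hp => hmem p (List.mem_cons_of_mem _ hp)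
            · intro w h1 h2
              rw [hset w (by omega)]
              split_ifs with hwv
              · right; left; rfl
              · exact hvals w h1 h2
            · intro u h1 h2 h3 h4
              rw [hset u (by omega)] at h3
              by_cases huv : u = v
              · rw [if_pos huv] at h3
                omega
              · rw [if_neg huv] at h3
                rcases hprop u h1 h2 h3 h4 with h | h
                · left
                  rw [hset (u + 1) (by omega)]
                  split_ifs with huv1
                  · exfalso
                    rw [huv1, hgav] at h
                    omega
                  · exact h
                · rcases List.mem_cons.mp h with hh | hh
                  · exfalso
                    have h5 := congrArg Prod.snd hh
                    simp at h5
                  · exact Or.inr hh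
          rw [ih (PySem.List.pySetD asgn v 0) rest (by omega) hInv2]
          exact (pv_conf_assign_false n a asgn v rest hgav hv1 hvlen).symm
        | true =>
          simp only [reduceIte] at hcnt ⊢
          have hq2 : (PySem.List.pyGetD imp v []).map (fun t => (t, true))
              = (if impB n a (v + 1) = true then [((v + 1 : Int), true)] else []) := by
            rw [Himp v hv1]
            split_ifs <;> simp
          have hset : ∀ w : Int, 0 ≤ w →
              gA (PySem.List.pySetD asgn v 1) w = if w = v then 1 else gA asgn w :=
            fun w hw => pv_gA_set asgn v w 1 (by omega) hvlen hw
          have himpb : impB n a (v + 1) = true → (1 ≤ v + 1 ∧ v + 1 ≤ n - 1) := by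
            intro h
            simp [impB] at h
            omega
          have hInv2 : InvL n a (PySem.List.pySetD asgn v 1)
              (rest ++ (if impB n a (v + 1) = true then [((v + 1 : Int), true)] else [])) := by
            refine ⟨?_, ?_, ?_, ?_⟩
            · rw [pv_pySetD_nn _ _ _ (by omega), List.length_set, hlen]
            · intro p hp
              rcases List.mem_append.mp hp with h | h
              · exact hmem p (List.mem_cons_of_mem _ h)
              · revert h
                split_ifs with hb
                · intro h
                  have hp1 : p = ((v + 1 : Int), true) := by simpa using h
                  rw [hp1]
                  exact himpb hb
                · intro h
                  simp at h
            · intro w h1 h2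
              rw [hset w (by omega)]
              split_ifs with hwv
              · right; right; rfl
              · exact hvals w h1 h2
            · intro u h1 h2 h3 h4
              rw [hset u (by omega)] at h3
              by_cases huv : u = v
              · right
                subst huv
                rw [if_pos h4]
                exact List.mem_append_right _ (by simp)
              · rw [if_neg huv] at h3
                rcases hprop u h1 h2 h3 h4 with h | h
                · by_cases huv1 : u + 1 = v
                  · left
                    rw [hset (u + 1) (by omega), if_pos huv1]
                  · left
                    rw [hset (u + 1) (by omega), if_neg huv1]
                    exact h
                · rcases List.mem_cons.mp h with hh | hh
                  · left
                    have huv1 : u + 1 = v := by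
                      have h5 := congrArg Prod.fst hh
                      simpa using h5
                    rw [hset (u + 1) (by omega), if_pos huv1]
                  · exact Or.inr (List.mem_append_left _ hh)
          have hlen2 : (rest ++ (if impB n a (v + 1) = true
              then [((v + 1 : Int), true)] else [])).length ≤ rest.length + 1 := by
            rw [List.length_append]
            split_ifs <;> simp
          rw [hq2, ih (PySem.List.pySetD asgn v 1) _ (by omega) hInv2]
          exact (pv_conf_assign_true n a asgn v rest hgav hv1 hv2 hvlen).symm
      · -- cur = 0
        subst hc1
        rw [hstep, if_pos (by omega)]
        cases val with
        | false =>
          rw [if_neg (by simp)]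
          have hprop2 : ∀ u : Int, 1 ≤ u → u ≤ n - 1 → gA asgn u = 1 →
              impB n a (u + 1) = true → (gA asgn (u + 1) = 1 ∨ (u + 1, true) ∈ rest) := by
            intro u h1 h2 h3 h4
            rcases hprop u h1 h2 h3 h4 with h | h
            · exact Or.inl h
            · rcases List.mem_cons.mp h with hh | hh
              · exfalso
                have h5 := congrArg Prod.snd hh
                simp at h5
              · exact Or.inr hh
          rw [ih asgn rest hMr ⟨hlen, fun p hp => hmem p (List.mem_cons_of_mem _ hp), hvals, hprop2⟩]
          exact (pv_conf_pop_false0 n a asgn v rest hgav).symm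
        | true =>
          rw [if_pos (by simp)]
          simp only [true_iff]
          exact ⟨v, hv1, hv2, Or.inl ⟨⟨v, List.mem_cons_self .., le_refl _,
            fun k hk1 hk2 => by omega⟩, Or.inl hgav⟩⟩
      · -- cur = 1
        subst hc1
        rw [hstep, if_pos (by omega)]
        cases val with
        | false =>
          rw [if_pos (by simp)]
          simp only [true_iff]
          exact ⟨v, hv1, hv2, Or.inr ⟨List.mem_cons_self .., hgav⟩⟩
        | true =>
          rw [if_neg (by simp)]
          have hprop2 : ∀ u : Int, 1 ≤ u → u ≤ n - 1 → gA asgn u = 1 →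
              impB n a (u + 1) = true → (gA asgn (u + 1) = 1 ∨ (u + 1, true) ∈ rest) := by
            intro u h1 h2 h3 h4
            rcases hprop u h1 h2 h3 h4 with h | h
            · exact Or.inl h
            · rcases List.mem_cons.mp h with hh | hh
              · left
                have huv1 : u + 1 = v := by
                  have h5 := congrArg Prod.fst hh
                  simpa using h5
                rw [huv1]
                exact hgav
              · exact Or.inr hh
          rw [ih asgn rest hMr ⟨hlen, fun p hp => hmem p (List.mem_cons_of_mem _ hp), hvals, hprop2⟩]
          exact (pv_conf_pop_true1 n a asgn v rest hgav hv1 hprop).symm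

-- ---- the sweep lemma for B ----

theorem pv_sweep (n : Int) (a : List Int) (f10 : List Bool)
    (hlen : f10.length = (n - 1 + 1).toNat)
    (h0 : ∀ w : Int, 1 ≤ w → w ≤ n - 1 →
      (PySem.List.pyGetD f10 w false = true ↔ T0 n a w)) :
    ∀ k : Nat, (k : Int) ≤ n - 1 →
      ((pvS a f10 k).length = (n - 1 + 1).toNat) ∧
      (∀ w : Int, 1 ≤ w → w ≤ n - 1 →
        (PySem.List.pyGetD (pvS a f10 k) w false = true
          ↔ ((w ≤ (k : Int) ∧ TStar n a w) ∨ ((k : Int) < w ∧ T0 n a w)))) := by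
  intro k
  induction k with
  | zero =>
    intro _
    rw [pvS_zero]
    refine ⟨hlen, ?_⟩
    intro w h1 h2
    rw [h0 w h1 h2]
    constructor
    · intro h
      exact Or.inr ⟨by omega, h⟩
    · rintro (⟨h3, -⟩ | ⟨-, h4⟩)
      · exfalso; omega
      · exact h4
  | succ k ihk =>
    intro hk
    have hkc : ((k + 1 : Nat) : Int) = (k : Int) + 1 := by push_cast; ring
    rw [hkc] at hk ⊢
    by_cases hk0 : k = 0
    · subst hk0
      rw [pvS_one]
      refine ⟨hlen, ?_⟩
      intro w h1 h2
      rw [h0 w h1 h2]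
      simp only [Nat.cast_zero]
      constructor
      · intro h
        by_cases hw1 : w ≤ 1
        · exact Or.inl ⟨by omega, (pv_TStar_base n a w (by omega)).mpr h⟩
        · exact Or.inr ⟨by omega, h⟩
      · rintro (⟨h3, h4⟩ | ⟨-, h4⟩)
        · exact (pv_TStar_base n a w (by omega)).mp h4
        · exact h4
    · obtain ⟨ihl, ihc⟩ := ihk (by omega)
      rw [pvS_succ a f10 k (by omega)]
      have he2 : 2 ≤ (k : Int) + 1 := by omega
      have hen : (k : Int) + 1 ≤ n - 1 := by omega
      have hOLDe1 := ihc ((k : Int) + 1 - 1) (by omega) (by omega)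
      unfold altSweep
      by_cases hcond : PySem.List.pyGetD a ((k : Int) + 1 - 1) 0 ≠ 0 ∧
          PySem.List.pyGetD (pvS a f10 k) ((k : Int) + 1 - 1) false = true
      · rw [if_pos hcond]
        have hel : (k : Int) + 1 < ((pvS a f10 k).length : Int) := by
          rw [ihl]
          omega
        refine ⟨by rw [pv_pySetD_nn _ _ _ (by omega), List.length_set, ihl], ?_⟩
        intro w h1 h2
        rw [pv_pyGetD_pySetD _ ((k : Int) + 1) w true false (by omega) (by omega) hel]
        have hpz : pzB a ((k : Int) + 1) = false := by
          simp only [pzB, beq_eq_false_iff_ne, ne_eq]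
          exact hcond.1
        have himp : impB n a ((k : Int) + 1) = true := by
          simp [impB, hpz]
          omega
        have hts1 : TStar n a ((k : Int) + 1 - 1) := by
          rcases hOLDe1.mp hcond.2 with ⟨-, h4⟩ | ⟨h3, -⟩
          · exact h4
          · exfalso; omega
        have hts : TStar n a ((k : Int) + 1) :=
          (pv_TStar_rec n a ((k : Int) + 1) he2).mpr (Or.inr ⟨himp, hts1⟩)
        by_cases hwe : w = (k : Int) + 1
        · rw [if_pos hwe]
          constructor
          · intro _
            exact Or.inl ⟨by omega, hwe ▸ hts⟩
          · intro _
            rfl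
        · rw [if_neg hwe, ihc w h1 h2]
          constructor
          · rintro (⟨h3, h4⟩ | ⟨h3, h4⟩)
            · exact Or.inl ⟨by omega, h4⟩
            · exact Or.inr ⟨by omega, h4⟩
          · rintro (⟨h3, h4⟩ | ⟨h3, h4⟩)
            · exact Or.inl ⟨by omega, h4⟩
            · exact Or.inr ⟨by omega, h4⟩
      · rw [if_neg hcond]
        refine ⟨ihl, ?_⟩
        intro w h1 h2
        rw [ihc w h1 h2]
        by_cases hwe : w = (k : Int) + 1
        · have hT : TStar n a w ↔ T0 n a w := by
            rw [pv_TStar_rec n a w (by omega)]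
            constructor
            · rintro (h | ⟨himp, hts⟩)
              · exact h
              · exfalso
                have hpz : pzB a w = false := by
                  simp [impB] at himp
                  exact himp.2
                have hnz : ¬ PySem.List.pyGetD a (w - 1) 0 = 0 := by
                  simp only [pzB, beq_eq_false_iff_ne, ne_eq] at hpz
                  exact hpz
                have hts' : TStar n a ((k : Int) + 1 - 1) := by
                  rw [show (k : Int) + 1 - 1 = w - 1 by omega]
                  exact hts
                have hold : PySem.List.pyGetD (pvS a f10 k) ((k : Int) + 1 - 1) false = true :=
                  hOLDe1.mpr (Or.inl ⟨by omega, hts'⟩)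
                apply hcond
                refine ⟨?_, hold⟩
                rw [show (k : Int) + 1 - 1 = w - 1 by omega]
                exact hnz
            · exact Or.inl
          constructor
          · rintro (⟨h3, -⟩ | ⟨-, h4⟩)
            · exfalso; omega
            · exact Or.inl ⟨by omega, hT.mpr h4⟩
          · rintro (⟨-, h4⟩ | ⟨h3, -⟩)
            · exact Or.inr ⟨by omega, hT.mp h4⟩
            · exfalso; omega
        · constructor
          · rintro (⟨h3, h4⟩ | ⟨h3, h4⟩)
            · exact Or.inl ⟨by omega, h4⟩
            · exact Or.inr ⟨by omega, h4⟩
          · rintro (⟨h3, h4⟩ | ⟨h3, h4⟩)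
            · exact Or.inl ⟨by omega, h4⟩
            · exact Or.inr ⟨by omega, h4⟩

-- ---- assembling the two sides ----

theorem pv_alif_iff (n : Int) (a : List Int) (hpre : Pre_alif n a) (hn : 1 ≤ n) :
    (alif n a = true ↔ Res n a) := by
  obtain ⟨hlena, hone⟩ := hpre
  have hjn : ((n.toNat : Nat) : Int) = n := by omega
  obtain ⟨hA1, hA2, hA3, hA4⟩ := pv_initA n a n.toNat (by omega)
  rw [hjn] at hA2 hA3 hA4
  have halif : alif n a
      = alifLoop (pvA n a n.toNat).1 (List.replicate (n - 1 + 1).toNat (-1)) (pvA n a n.toNat).2 := by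
    simp only [alif, pvA, hjn]
  have hT : ∀ w : Int, ((w, true) ∈ (pvA n a n.toNat).2 ↔ T0 n a w) := by
    intro w
    rw [hA4 w]
    unfold T0
    constructor
    · rintro (⟨h1, h2, h3⟩ | ⟨h1, h2, h3⟩)
      · exact Or.inl ⟨h1, by omega, h3⟩
      · exact Or.inr ⟨h1, by omega, h3⟩
    · rintro (⟨h1, h2, h3⟩ | ⟨h1, h2, h3⟩)
      · exact Or.inl ⟨h1, by omega, h3⟩
      · exact Or.inr ⟨h1, by omega, h3⟩
  have hF : ∀ w : Int, ((w, false) ∈ (pvA n a n.toNat).2 ↔ F0 n a w) := by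
    intro w
    rw [hA3 w]
    unfold F0
    constructor
    · rintro (⟨h1, h2, h3, h4⟩ | ⟨h1, h2, h3, h4⟩)
      · exact Or.inl ⟨h1, h3, h4⟩
      · exact Or.inr ⟨h1, h2, h4⟩
    · rintro (⟨h1, h2, h3⟩ | ⟨h1, h2, h3⟩)
      · exact Or.inl ⟨h1, by omega, h2, h3⟩
      · exact Or.inr ⟨h1, h2, by omega, h3⟩
  have hClT : ∀ w : Int, (Cl n a (pvA n a n.toNat).2 w ↔ TStar n a w) := by
    intro w
    unfold Cl TStar
    constructor
    · rintro ⟨u, hu, h1, h2⟩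
      exact ⟨u, h1, (hT u).mp hu, h2⟩
    · rintro ⟨s, h1, h2, h3⟩
      exact ⟨s, (hT s).mpr h2, h1, h3⟩
  have Himp : ∀ v : Int, 1 ≤ v →
      PySem.List.pyGetD (pvA n a n.toNat).1 v []
        = if impB n a (v + 1) = true then [v + 1] else [] := by
    intro v hv
    rw [hA2 v hv]
    by_cases h1 : impB n a (v + 1) = true
    · have h2 : ((2 ≤ v + 1 ∧ v + 1 ≤ n - 1) ∧ pzB a (v + 1) = false) := by
        simpa [impB] using h1
      rw [if_pos ⟨by omega, by omega, h2.2⟩, if_pos h1]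
    · rw [if_neg h1, if_neg ?_]
      rintro ⟨c1, c2, c3⟩
      apply h1
      simp [impB, c3]
      omega
  have hga0 : ∀ w : Int, 1 ≤ w → w ≤ n - 1 →
      gA (List.replicate (n - 1 + 1).toNat (-1 : Int)) w = -1 := by
    intro w h1 h2
    unfold gA
    rw [pv_pyGetD_nn _ _ _ (by omega)]
    exact pv_getD_replicate_lt _ _ _ _ (by omega)
  have hInv : InvL n a (List.replicate (n - 1 + 1).toNat (-1 : Int)) (pvA n a n.toNat).2 := by
    refine ⟨by rw [List.length_replicate]; omega, ?_, ?_, ?_⟩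
    · intro p hp
      obtain ⟨w, b⟩ := p
      cases b with
      | false =>
        rcases (hF w).mp hp with ⟨h1, h2, -⟩ | ⟨h1, h2, -⟩ <;> exact ⟨by omega, by omega⟩
      | true =>
        rcases (hT w).mp hp with ⟨h1, h2, -⟩ | ⟨h1, h2, h3⟩
        · exact ⟨by omega, by omega⟩
        · refine ⟨by omega, ?_⟩
          by_contra hh
          have hne1 : n = 1 := by omega
          have h5 := hone hne1
          have h6 : pzB a 1 = true := by
            simp only [pzB]
            rw [show (1 : Int) - 1 = 0 by ring, h5]
            rfl
          rw [h6] at h3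
          simp at h3
    · intro w h1 h2
      exact Or.inl (hga0 w h1 h2)
    · intro u h1 h2 h3 _
      rw [hga0 u h1 h2] at h3
      exact absurd h3 (by omega)
  rw [halif, pv_loop_iff n a (pvA n a n.toNat).1 Himp _ _ hInv]
  constructor
  · rintro ⟨w, h1, h2, hcase⟩
    rcases hcase with ⟨hcl, hside⟩ | ⟨hmemf, hga⟩
    · rcases hside with h0 | hmemf
      · rw [hga0 w h1 h2] at h0
        exact absurd h0 (by omega)
      · exact ⟨w, (hF w).mp hmemf, (hClT w).mp hcl⟩
    · rw [hga0 w h1 h2] at hga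
      exact absurd hga (by omega)
  · rintro ⟨e, hF0, hTs⟩
    have hb : (1 ≤ e ∧ e ≤ n - 1) := by
      rcases hF0 with ⟨h1, h2, -⟩ | ⟨h1, h2, -⟩ <;> exact ⟨by omega, by omega⟩
    exact ⟨e, hb.1, hb.2, Or.inl ⟨(hClT e).mpr hTs, Or.inr ((hF e).mpr hF0)⟩⟩

theorem pv_alt_iff (n : Int) (a : List Int) (hpre : Pre_alif n a) (hn : 1 ≤ n) :
    (alif_alt n a = true ↔ Res n a) := by
  obtain ⟨hlena, hone⟩ := hpre
  have hn1 : n = 1 → pzB a 1 = true := by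
    intro h
    simp only [pzB]
    rw [show (1 : Int) - 1 = 0 by ring, hone h]
    rfl
  have hjn : ((n.toNat : Nat) : Int) = n := by omega
  have hkn : (((n - 1).toNat : Nat) : Int) = n - 1 := by omega
  obtain ⟨hB1, hB2, hB3, hB4⟩ := pv_initB n a hn1 n.toNat (by omega)
  rw [hjn] at hB3 hB4
  have hF0c : ∀ w : Int, 1 ≤ w → w ≤ n - 1 →
      (PySem.List.pyGetD (pvB n a n.toNat).1 w false = true ↔ F0 n a w) := by
    intro w h1 h2
    rw [hB3 w h1]
    unfold F0
    constructor
    · rintro (⟨g1, g2, g3, g4⟩ | ⟨g1, g2, g3, g4⟩)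
      · exact Or.inl ⟨g1, g3, g4⟩
      · exact Or.inr ⟨g1, g2, g4⟩
    · rintro (⟨g1, g2, g3⟩ | ⟨g1, g2, g3⟩)
      · exact Or.inl ⟨g1, by omega, g2, g3⟩
      · exact Or.inr ⟨g1, g2, by omega, g3⟩
  have hT0c : ∀ w : Int, 1 ≤ w → w ≤ n - 1 →
      (PySem.List.pyGetD (pvB n a n.toNat).2 w false = true ↔ T0 n a w) := by
    intro w h1 h2
    rw [hB4 w h1]
    unfold T0
    constructor
    · rintro (⟨g1, g2, g3⟩ | ⟨g1, g2, g3⟩)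
      · exact Or.inl ⟨g1, by omega, g3⟩
      · exact Or.inr ⟨g1, by omega, g3⟩
    · rintro (⟨g1, g2, g3⟩ | ⟨g1, g2, g3⟩)
      · exact Or.inl ⟨g1, by omega, g3⟩
      · exact Or.inr ⟨g1, by omega, g3⟩
  obtain ⟨hswl, hswc⟩ := pv_sweep n a (pvB n a n.toNat).2 hB2 hT0c (n - 1).toNat (by omega)
  rw [hkn] at hswc
  have halt : alif_alt n a = (PySem.List.pyRange 1 (n - 1 + 1) 1).any
      (fun e => PySem.List.pyGetD (pvB n a n.toNat).1 e false
        && PySem.List.pyGetD (pvS a (pvB n a n.toNat).2 (n - 1).toNat) e false) := by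
    simp only [alif_alt, pvB, pvS, hjn, hkn]
  rw [halt, List.any_eq_true]
  constructor
  · rintro ⟨e, hee, he⟩
    rw [PySem.List.mem_pyRange_one] at hee
    rw [Bool.and_eq_true] at he
    have hb1 : 1 ≤ e := hee.1
    have hb2 : e ≤ n - 1 := by omega
    refine ⟨e, (hF0c e hb1 hb2).mp he.1, ?_⟩
    rcases (hswc e hb1 hb2).mp he.2 with ⟨-, h4⟩ | ⟨h3, -⟩
    · exact h4
    · exfalso; omega
  · rintro ⟨e, hF0, hTs⟩
    have hb : (1 ≤ e ∧ e ≤ n - 1) := by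
      rcases hF0 with ⟨h1, h2, -⟩ | ⟨h1, h2, -⟩ <;> exact ⟨by omega, by omega⟩
    refine ⟨e, ?_, ?_⟩
    · rw [PySem.List.mem_pyRange_one]
      omega
    · rw [Bool.and_eq_true]
      exact ⟨(hF0c e hb.1 hb.2).mpr hF0, (hswc e hb.1 hb.2).mpr (Or.inl ⟨hb.2, hTs⟩)⟩

theorem pv_main (n : Int) (a : List Int) (hpre : Pre_alif n a) : alif n a = alif_alt n a := by
  by_cases hn : 1 ≤ n
  · have h1 := pv_alif_iff n a hpre hn
    have h2 := pv_alt_iff n a hpre hn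
    cases hA : alif n a <;> cases hB : alif_alt n a <;> simp_all
  · have h1 : PySem.List.pyRange 1 (n + 1) 1 = [] := PySem.List.pyRange_one_eq_nil (by omega)
    have h2 : PySem.List.pyRange 1 (n - 1 + 1) 1 = [] := PySem.List.pyRange_one_eq_nil (by omega)
    have h3 : PySem.List.pyRange 2 (n - 1 + 1) 1 = [] := PySem.List.pyRange_one_eq_nil (by omega)
    simp only [alif, alif_alt, h1, h2, h3, List.foldl_nil, List.any_nil]
    rw [alifLoop]

-- ===== VERDICT (by name: the statement is the Claim_ definition above) =====
theorem alif_spec : Claim_equal_alif := by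
  intro n a _ hpre
  unfold Spec_alif
  exact pv_main n a hpre
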